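-- pv_equiv track=rewrite | github.com/HuQyang/wandouzero | douzero/evaluation/deep_agent.py | check_no_bombs_old
-- ===== SOURCE A (Python) =====
-- from collections import Counter
--
-- def check_no_bombs_old(cards):
--     card_counts = Counter(cards)
--     for count in card_counts.values():
--         if count == 4:
--             return False
--
--     if 20 in card_counts and 30 in card_counts:
--         return False
--
--     return True
-- ===== SOURCE B (Python) =====
-- def check_no_bombs_old(cards):
--     s = sorted(cards)
--     i = 0
--     n = len(s)
--     while i < n:
--         j = i
--         while j < n and s[j] == s[i]:
--             j += 1
--         if j - i == 4:
--             return False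
--         i = j
--     if 20 in cards and 30 in cards:
--         return False
--     return True
-- ===== Notes on version B (the rewrite author's own statement) =====
-- stated objective: alternative
-- what changed: Replaces the Counter hash-count pass with a sort followed by a run-length scan over consecutive equal elements, returning False on a run of exactly 4; the rocket check becomes plain list membership instead of dict containment.
import Mathlib
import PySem

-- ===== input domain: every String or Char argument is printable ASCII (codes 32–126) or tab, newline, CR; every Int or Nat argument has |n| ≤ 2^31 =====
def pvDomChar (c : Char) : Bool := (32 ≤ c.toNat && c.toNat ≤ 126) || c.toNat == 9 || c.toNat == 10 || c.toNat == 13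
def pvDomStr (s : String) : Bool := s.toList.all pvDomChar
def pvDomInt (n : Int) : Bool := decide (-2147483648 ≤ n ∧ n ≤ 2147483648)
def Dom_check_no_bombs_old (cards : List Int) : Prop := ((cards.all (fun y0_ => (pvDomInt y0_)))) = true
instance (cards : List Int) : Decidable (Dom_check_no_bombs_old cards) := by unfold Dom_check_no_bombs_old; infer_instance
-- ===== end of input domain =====

-- B replaces the Counter hash-count pass by sort + run-length scan over consecutive equal elements (alternative decomposition, same result).

-- ===== PORT A =====
-- Counter(cards); return False on any count == 4; then the rocket check on dict containment.
def check_no_bombs_old (cards : List Int) : Bool :=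
  let card_counts := PySem.Dict.counter cards
  if card_counts.values.any (fun count => count == 4) then false
  else if card_counts.contains 20 && card_counts.contains 30 then false
  else true

-- ===== PORT B =====
-- the inner while loop of Source B: x = value of the current run, k = its length so far
def pvRunScan : Int → Nat → List Int → Bool
  | _, k, [] => k == 4
  | x, k, y :: t => if y == x then pvRunScan x (k+1) t
      else if k == 4 then true else pvRunScan y 1 t

def check_no_bombs_old_alt (cards : List Int) : Bool :=
  let s := PySem.List.sorted cards (fun x => x) false
  let hasBomb := match s with
    | [] => false
    | x :: t => pvRunScan x 1 t
  if hasBomb then false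
  else if cards.contains 20 && cards.contains 30 then false
  else true

-- ===== PRECONDITION & SPEC =====
def Spec_check_no_bombs_old (cards : List Int) (out : Bool) : Prop := out = check_no_bombs_old_alt cards
instance (cards : List Int) (out : Bool) : Decidable (Spec_check_no_bombs_old cards out) := by unfold Spec_check_no_bombs_old; infer_instance

-- ===== CLAIM (what is proved, stated in full; the proofs are below) =====
def Claim_equal_check_no_bombs_old : Prop := ∀ (cards : List Int), Dom_check_no_bombs_old cards → Spec_check_no_bombs_old cards (check_no_bombs_old cards)

-- ===== LEMMAS AND PROOFS =====

theorem pvCountConsSelf (x : Int) (l : List Int) : (x :: l).count x = l.count x + 1 := by simp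

theorem pvCountConsNe {z y : Int} (l : List Int) (h : z ≠ y) : (y :: l).count z = l.count z := by
  simp [Ne.symm h]

-- the run-length scan on a sorted tail detects exactly "some total count is 4"
theorem pvRunScan_spec (t : List Int) : ∀ (x : Int) (k : Nat),
    (x :: t).Pairwise (· ≤ ·) →
    (pvRunScan x k t = true ↔ (k + t.count x = 4 ∨ ∃ y ∈ t, y ≠ x ∧ t.count y = 4)) := by
  induction t with
  | nil =>
    intro x k _
    simp [pvRunScan]
  | cons y t' ih =>
    intro x k h
    by_cases hyx : y = x
    · subst hyx
      rw [pvRunScan]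
      simp only [BEq.rfl, if_true]
      rw [ih y (k+1) h.of_cons]
      constructor
      · rintro (hc | ⟨z, hz, hzy, hc⟩)
        · left; rw [pvCountConsSelf]; omega
        · right; exact ⟨z, List.mem_cons_of_mem _ hz, hzy, by rw [pvCountConsNe _ hzy]; exact hc⟩
      · rintro (hc | ⟨z, hz, hzy, hc⟩)
        · left; rw [pvCountConsSelf] at hc; omega
        · rcases List.mem_cons.mp hz with hz' | hz'
          · exact absurd hz' hzy
          · right; exact ⟨z, hz', hzy, by rw [pvCountConsNe _ hzy] at hc; exact hc⟩
    · have hxy : x < y := by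
        have := (List.pairwise_cons.mp h).1 y (List.mem_cons_self)
        exact lt_of_le_of_ne this (fun e => hyx e.symm)
      have ht' : ∀ z ∈ t', y ≤ z := (List.pairwise_cons.mp h.of_cons).1
      have hxnot : ∀ z ∈ y :: t', z ≠ x := by
        intro z hz
        rcases List.mem_cons.mp hz with hz' | hz'
        · exact hz' ▸ hyx
        · exact fun e => absurd (e ▸ ht' z hz') (not_le.mpr hxy)
      have hcx : (y :: t').count x = 0 := by
        rw [List.count_eq_zero]
        intro hmem; exact (hxnot x hmem) rfl
      rw [pvRunScan]
      have hbne : (y == x) = false := by simp [hyx]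
      rw [hbne]
      simp only [Bool.false_eq_true, if_false]
      by_cases hk : k = 4
      · subst hk
        simp [hcx]
      · have hk4 : (k == 4) = false := by simp [hk]
        rw [hk4]
        simp only [Bool.false_eq_true, if_false]
        rw [ih y 1 h.of_cons]
        constructor
        · rintro (hc | ⟨z, hz, hzy, hc⟩)
          · right
            exact ⟨y, List.mem_cons_self, hyx, by rw [pvCountConsSelf]; omega⟩
          · right
            exact ⟨z, List.mem_cons_of_mem _ hz, hxnot z (List.mem_cons_of_mem _ hz),
              by rw [pvCountConsNe _ hzy]; exact hc⟩
        · rintro (hc | ⟨z, hz, hzx2, hc⟩)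
          · rw [hcx] at hc; omega
          · rcases List.mem_cons.mp hz with hz' | hz'
            · subst hz'
              left; rw [pvCountConsSelf] at hc; omega
            · by_cases hzy : z = y
              · subst hzy
                left; rw [pvCountConsSelf] at hc; omega
              · right
                exact ⟨z, hz', hzy, by rw [pvCountConsNe _ hzy] at hc; exact hc⟩

-- A's bomb test: some Counter value equals 4
theorem bombA_iff (cards : List Int) :
    ((PySem.Dict.counter cards).values.any (fun count => count == 4) = true) ↔
    (∃ v ∈ cards, cards.count v = 4) := by
  have hv : (PySem.Dict.counter cards).values
      = (PySem.Set.ofList cards).map (fun k => ((List.count k cards : Int))) := by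
    simp [PySem.Dict.values, PySem.Dict.items_counter]
  rw [hv]
  constructor
  · intro h
    rcases List.any_eq_true.mp h with ⟨c, hc, h4⟩
    rcases List.mem_map.mp hc with ⟨k, hk, rfl⟩
    refine ⟨k, (PySem.Set.mem_ofList cards k).mp hk, ?_⟩
    have h4' : ((List.count k cards : Int)) = 4 := by simpa using h4
    exact_mod_cast h4'
  · rintro ⟨v, hv2, h4⟩
    exact List.any_eq_true.mpr ⟨((List.count v cards : Int)),
      List.mem_map.mpr ⟨v, (PySem.Set.mem_ofList cards v).mpr hv2, rfl⟩, by simp [h4]⟩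

-- B's bomb test: the run scan over the sorted list fires
theorem bombB_iff (cards : List Int) :
    ((match PySem.List.sorted cards (fun x => x) false with
      | [] => false
      | x :: t => pvRunScan x 1 t) = true) ↔
    (∃ v ∈ cards, cards.count v = 4) := by
  have hperm : (PySem.List.sorted cards (fun x => x) false).Perm cards :=
    PySem.List.sorted_perm cards (fun x => x) false
  have hpw : (PySem.List.sorted cards (fun x => x) false).Pairwise (· ≤ ·) := by
    simpa using PySem.List.sorted_pairwise cards (fun x => x)
  cases hs : PySem.List.sorted cards (fun x => x) false with
  | nil =>
    have hnil : cards = [] := ((PySem.List.sorted_eq_nil_iff cards _ false).mp hs)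
    subst hnil; simp
  | cons x t =>
    rw [hs] at hperm hpw
    rw [pvRunScan_spec t x 1 hpw]
    constructor
    · rintro (hc | ⟨y, hy, hyx, hc⟩)
      · exact ⟨x, hperm.mem_iff.mp List.mem_cons_self,
          by rw [← hperm.count_eq, pvCountConsSelf]; omega⟩
      · exact ⟨y, hperm.mem_iff.mp (List.mem_cons_of_mem _ hy),
          by rw [← hperm.count_eq, pvCountConsNe _ hyx]; exact hc⟩
    · rintro ⟨v, hv, hc⟩
      rw [← hperm.count_eq] at hc
      by_cases hvx : v = x
      · subst hvx; left; rw [pvCountConsSelf] at hc; omega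
      · right
        have hvt : v ∈ t := by
          rcases List.mem_cons.mp (hperm.mem_iff.mpr hv) with h | h
          · exact absurd h hvx
          · exact h
        exact ⟨v, hvt, hvx, by rw [pvCountConsNe _ hvx] at hc; exact hc⟩

-- ===== VERDICT (by name: the statement is the Claim_ definition above) =====
theorem check_no_bombs_old_spec : Claim_equal_check_no_bombs_old := by
  intro cards _
  show check_no_bombs_old cards = check_no_bombs_old_alt cards
  show (if (PySem.Dict.counter cards).values.any (fun count => count == 4) then false
        else if (PySem.Dict.counter cards).contains 20 && (PySem.Dict.counter cards).contains 30 then false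
        else true)
     = (if (match PySem.List.sorted cards (fun x => x) false with
            | [] => false
            | x :: t => pvRunScan x 1 t) then false
        else if cards.contains 20 && cards.contains 30 then false
        else true)
  by_cases hb : ∃ v ∈ cards, cards.count v = 4
  · rw [if_pos ((bombA_iff cards).mpr hb), if_pos ((bombB_iff cards).mpr hb)]
  · rw [if_neg (fun h => hb ((bombA_iff cards).mp h)),
        if_neg (fun h => hb ((bombB_iff cards).mp h)),
        PySem.Dict.contains_counter, PySem.Dict.contains_counter]
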